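-- pv_equiv track=rewrite | github.com/dag-hammarskjold-library/unov | compare.py | split_by_language
-- ===== SOURCE A (Python) =====
-- def split_by_language(data,ind):
-- 	"""
-- 	Takes a dataset and split it by anguage
-- 	"""
-- 	en = []
-- 	fr = []
-- 	es = []
-- 	others = []
-- 	for row in data:
-- 		if row[ind] == 'French':
-- 			fr.append(row)
-- 		elif row[ind] == 'English':
-- 			en.append(row)
-- 		elif row[ind] == 'Spanish':
-- 			es.append(row)
-- 		else:
-- 			others.append(row)
-- 	return en, fr, es, others
-- ===== SOURCE B (Python) =====
-- def split_by_language(data, ind):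
--     en = [row for row in data if row[ind] == 'English']
--     fr = [row for row in data if row[ind] == 'French']
--     es = [row for row in data if row[ind] == 'Spanish']
--     others = [row for row in data if row[ind] not in ('French', 'English', 'Spanish')]
--     return en, fr, es, others
-- ===== Notes on version B (the rewrite author's own statement) =====
-- stated objective: idiomatic
-- what changed: Replaces the single pass with per-bucket mutation by four independent list-comprehension filters over the data, one per bucket.
import Mathlib
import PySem

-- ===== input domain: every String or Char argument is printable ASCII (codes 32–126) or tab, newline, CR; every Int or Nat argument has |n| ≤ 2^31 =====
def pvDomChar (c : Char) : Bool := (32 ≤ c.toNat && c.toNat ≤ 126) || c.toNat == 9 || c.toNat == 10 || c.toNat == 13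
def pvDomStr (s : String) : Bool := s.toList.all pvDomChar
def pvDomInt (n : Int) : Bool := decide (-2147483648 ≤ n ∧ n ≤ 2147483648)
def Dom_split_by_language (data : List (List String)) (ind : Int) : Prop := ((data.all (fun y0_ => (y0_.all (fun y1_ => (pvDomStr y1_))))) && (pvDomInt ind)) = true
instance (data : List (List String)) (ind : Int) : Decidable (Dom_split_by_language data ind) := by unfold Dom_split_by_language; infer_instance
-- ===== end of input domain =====

-- One honest line: B replaces A's single partitioning pass with four independent comprehension filters (idiomatic; same O(n) cost up to constants).
-- ===== PORT A =====
-- the for-loop of A as structural recursion over data, carrying the four accumulators (en, fr, es, others)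
def splitGoA (data : List (List String)) (ind : Int)
    (en fr es ot : List (List String)) :
    List (List String) × List (List String) × List (List String) × List (List String) :=
  match data with
  | [] => (en, fr, es, ot)
  | row :: rest =>
    match PySem.List.pyGet? row ind with
    | some v =>
      if v = "French" then splitGoA rest ind en (fr ++ [row]) es ot
      else if v = "English" then splitGoA rest ind (en ++ [row]) fr es ot
      else if v = "Spanish" then splitGoA rest ind en fr (es ++ [row]) ot
      else splitGoA rest ind en fr es (ot ++ [row])
    | none => splitGoA rest ind en fr es ot  -- row[ind] raises IndexError in Python; excluded by Pre_

def split_by_language (data : List (List String)) (ind : Int) : List (List String) × List (List String) × List (List String) × List (List String) :=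
  splitGoA data ind [] [] [] []

-- ===== PORT B =====
def split_by_language_alt (data : List (List String)) (ind : Int) : List (List String) × List (List String) × List (List String) × List (List String) :=
  (data.filter (fun row => PySem.List.pyGet? row ind = some "English"),
   data.filter (fun row => PySem.List.pyGet? row ind = some "French"),
   data.filter (fun row => PySem.List.pyGet? row ind = some "Spanish"),
   data.filter (fun row => ¬ (PySem.List.pyGet? row ind = some "French" ∨
                              PySem.List.pyGet? row ind = some "English" ∨
                              PySem.List.pyGet? row ind = some "Spanish")))

-- ===== PRECONDITION & SPEC =====
-- Pre_ excludes exactly the inputs where row[ind] raises IndexError (some row where ind is not a valid Python index).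
def Pre_split_by_language (data : List (List String)) (ind : Int) : Prop :=
  ∀ row ∈ data, PySem.Raise.InRange row.length ind
instance (data : List (List String)) (ind : Int) : Decidable (Pre_split_by_language data ind) := by unfold Pre_split_by_language; infer_instance
def pvWitness_split_by_language : List (List String) × Int :=
  ([["English", "a"], ["French", "b"], ["Dutch", "c"]], 0)
def Spec_split_by_language (data : List (List String)) (ind : Int) (out : List (List String) × List (List String) × List (List String) × List (List String)) : Prop := out = split_by_language_alt data ind
instance (data : List (List String)) (ind : Int) (out : List (List String) × List (List String) × List (List String) × List (List String)) : Decidable (Spec_split_by_language data ind out) := by unfold Spec_split_by_language; infer_instance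

-- ===== CLAIM (what is proved, stated in full; the proofs are below) =====
def Claim_equal_split_by_language : Prop := ∀ (data : List (List String)) (ind : Int), Dom_split_by_language data ind → Pre_split_by_language data ind → Spec_split_by_language data ind (split_by_language data ind)

-- ===== LEMMAS AND PROOFS =====
theorem splitGoA_eq (data : List (List String)) (ind : Int)
    (en fr es ot : List (List String))
    (h : ∀ row ∈ data, PySem.Raise.InRange row.length ind) :
    splitGoA data ind en fr es ot =
      (en ++ data.filter (fun row => PySem.List.pyGet? row ind = some "English"),
       fr ++ data.filter (fun row => PySem.List.pyGet? row ind = some "French"),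
       es ++ data.filter (fun row => PySem.List.pyGet? row ind = some "Spanish"),
       ot ++ data.filter (fun row => ¬ (PySem.List.pyGet? row ind = some "French" ∨
                                        PySem.List.pyGet? row ind = some "English" ∨
                                        PySem.List.pyGet? row ind = some "Spanish"))) := by
  induction data generalizing en fr es ot with
  | nil => simp [splitGoA]
  | cons row rest ih =>
    have hr : PySem.Raise.InRange row.length ind := h row (by simp)
    have hrest : ∀ r ∈ rest, PySem.Raise.InRange r.length ind :=
      fun r hm => h r (by simp [hm])
    obtain ⟨v, hv⟩ : ∃ v, PySem.List.pyGet? row ind = some v := by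
      cases hg : PySem.List.pyGet? row ind with
      | none => exact absurd hr (by simpa [PySem.List.pyGet?_eq_none_iff] using hg)
      | some v => exact ⟨v, rfl⟩
    simp only [splitGoA, hv]
    by_cases h1 : v = "French"
    · simp [h1, hv, ih _ _ _ _ hrest, List.filter_cons]
    · by_cases h2 : v = "English"
      · simp [h1, h2, hv, ih _ _ _ _ hrest, List.filter_cons]
      · by_cases h3 : v = "Spanish"
        · simp [h1, h2, h3, hv, ih _ _ _ _ hrest, List.filter_cons]
        · simp [h1, h2, h3, hv, ih _ _ _ _ hrest, List.filter_cons]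

-- ===== VERDICT (by name: the statement is the Claim_ definition above) =====
theorem split_by_language_spec : Claim_equal_split_by_language := by
  intro data ind _ hpre
  unfold Spec_split_by_language split_by_language split_by_language_alt
  simp [splitGoA_eq data ind [] [] [] [] hpre]
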